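-- pv_equiv track=rewrite | github.com/tscizzle/bs-poker-simulation | poker.py | four_of_a_kind_finder
-- ===== SOURCE A (Python) =====
-- from collections import Counter, defaultdict
--
-- def get_card_rank(card):
--     return (card % 13) + 2
--
-- def four_of_a_kind_finder(natural_cards, num_wilds=0):
--     rank_counts = Counter(get_card_rank(card) for card in natural_cards)
--     solo_ranks = set(rank for rank, count in rank_counts.items() if count >= 1)
--     pair_ranks = set(rank for rank, count in rank_counts.items() if count >= 2)
--     triplet_ranks = set(
--         rank
--         for rank, count in rank_counts.items()
--         if count >= 3
--     )
--     quartet_ranks = set(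
--         rank
--         for rank, count in rank_counts.items()
--         if count >= 4
--     )
--
--     if num_wilds == 0:
--         quartet_ranks = quartet_ranks
--     elif num_wilds == 1:
--         quartet_ranks = quartet_ranks | triplet_ranks
--     elif num_wilds == 2:
--         quartet_ranks = quartet_ranks | triplet_ranks | pair_ranks
--     elif num_wilds == 3:
--         quartet_ranks = quartet_ranks | triplet_ranks | pair_ranks | solo_ranks
--     elif num_wilds >= 4:
--         quartet_ranks = [14]
--
--     if len(quartet_ranks) == 0:
--         return False, {}
--     else:
--         rank = max(quartet_ranks)
--         return True, { 'rank': rank }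
-- ===== SOURCE B (Python) =====
-- from collections import Counter
--
--
-- def get_card_rank(card):
--     return (card % 13) + 2
--
--
-- def four_of_a_kind_finder(natural_cards, num_wilds=0):
--     if num_wilds >= 4:
--         return True, {'rank': 14}
--     rank_counts = Counter(get_card_rank(card) for card in natural_cards)
--     threshold = 4 - max(num_wilds, 0)
--     candidates = [rank for rank, count in rank_counts.items() if count >= threshold]
--     if candidates:
--         return True, {'rank': max(candidates)}
--     return False, {}
-- ===== Notes on version B (the rewrite author's own statement) =====
-- stated objective: simpler
-- what changed: Replaces A's four separate rank sets and the five-way if/elif set-union ladder by a single count threshold (4 - max(num_wilds,0)) collected in one pass over the Counter, with the num_wilds >= 4 case returning rank 14 up front.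
import Mathlib
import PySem

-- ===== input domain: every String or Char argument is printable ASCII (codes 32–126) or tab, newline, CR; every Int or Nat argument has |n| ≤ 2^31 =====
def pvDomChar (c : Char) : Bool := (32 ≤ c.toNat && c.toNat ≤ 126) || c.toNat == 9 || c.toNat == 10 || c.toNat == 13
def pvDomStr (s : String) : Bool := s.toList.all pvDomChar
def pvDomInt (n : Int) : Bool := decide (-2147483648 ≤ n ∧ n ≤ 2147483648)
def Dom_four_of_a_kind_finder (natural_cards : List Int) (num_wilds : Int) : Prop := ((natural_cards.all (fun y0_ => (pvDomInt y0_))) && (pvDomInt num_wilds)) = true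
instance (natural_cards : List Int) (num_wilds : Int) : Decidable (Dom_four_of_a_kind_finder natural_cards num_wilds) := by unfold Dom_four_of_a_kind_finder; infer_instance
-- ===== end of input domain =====

-- B replaces A's four rank sets and five-way set-union ladder by a single count
-- threshold collected in one pass (objective: simpler); same return values everywhere.

-- ===== PORT A =====
-- helper shared by both sources: get_card_rank(card) = (card % 13) + 2 (Python %)
def get_card_rank (card : Int) : Int := PySem.Int.mod card 13 + 2

def four_of_a_kind_finder (natural_cards : List Int) (num_wilds : Int) : Bool × (List (String × Int)) :=
  let rank_counts : PySem.Dict Int Int := PySem.Dict.counter (natural_cards.map get_card_rank)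
  let solo_ranks : PySem.Set Int :=
    PySem.Set.ofList (((rank_counts.items).filter (fun p => 1 ≤ p.2)).map Prod.fst)
  let pair_ranks : PySem.Set Int :=
    PySem.Set.ofList (((rank_counts.items).filter (fun p => 2 ≤ p.2)).map Prod.fst)
  let triplet_ranks : PySem.Set Int :=
    PySem.Set.ofList (((rank_counts.items).filter (fun p => 3 ≤ p.2)).map Prod.fst)
  let quartet_ranks : PySem.Set Int :=
    PySem.Set.ofList (((rank_counts.items).filter (fun p => 4 ≤ p.2)).map Prod.fst)
  let quartet_ranks2 : List Int :=
    if num_wilds = 0 then quartet_ranks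
    else if num_wilds = 1 then PySem.Set.union quartet_ranks triplet_ranks
    else if num_wilds = 2 then
      PySem.Set.union (PySem.Set.union quartet_ranks triplet_ranks) pair_ranks
    else if num_wilds = 3 then
      PySem.Set.union (PySem.Set.union (PySem.Set.union quartet_ranks triplet_ranks) pair_ranks) solo_ranks
    else if 4 ≤ num_wilds then [14]
    else quartet_ranks
  if quartet_ranks2.length = 0 then (false, [])
  else
    -- max(quartet_ranks): safe over a Set without a key (value independent of iteration order)
    match PySem.List.max? quartet_ranks2 (fun x => x) with
    | some r => (true, [("rank", r)])
    | none => (false, [])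

-- ===== PORT B =====
def four_of_a_kind_finder_alt (natural_cards : List Int) (num_wilds : Int) : Bool × (List (String × Int)) :=
  if 4 ≤ num_wilds then (true, [("rank", 14)])
  else
    let rank_counts : PySem.Dict Int Int := PySem.Dict.counter (natural_cards.map get_card_rank)
    let threshold : Int := 4 - max num_wilds 0
    let candidates : List Int :=
      ((rank_counts.items).filter (fun p => threshold ≤ p.2)).map Prod.fst
    match PySem.List.max? candidates (fun x => x) with
    | some r => (true, [("rank", r)])
    | none => (false, [])

-- ===== PRECONDITION & SPEC =====
def Spec_four_of_a_kind_finder (natural_cards : List Int) (num_wilds : Int) (out : Bool × (List (String × Int))) : Prop := out = four_of_a_kind_finder_alt natural_cards num_wilds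
instance (natural_cards : List Int) (num_wilds : Int) (out : Bool × (List (String × Int))) : Decidable (Spec_four_of_a_kind_finder natural_cards num_wilds out) := by unfold Spec_four_of_a_kind_finder; infer_instance

-- ===== CLAIM (what is proved, stated in full; the proofs are below) =====
def Claim_equal_four_of_a_kind_finder : Prop := ∀ (natural_cards : List Int) (num_wilds : Int), Dom_four_of_a_kind_finder natural_cards num_wilds → Spec_four_of_a_kind_finder natural_cards num_wilds (four_of_a_kind_finder natural_cards num_wilds)

-- ===== LEMMAS AND PROOFS =====

-- max over Int with the identity key depends only on which elements occur
lemma max?_id_congr (xs ys : List Int) (h : ∀ x, x ∈ xs ↔ x ∈ ys) :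
    PySem.List.max? xs (fun x => x) = PySem.List.max? ys (fun x => x) := by
  cases hx : PySem.List.max? xs (fun x => x) with
  | none =>
    cases hy : PySem.List.max? ys (fun x => x) with
    | none => rfl
    | some m =>
      have hm := PySem.List.max?_mem hy
      have hxs : xs = [] := (PySem.List.max?_eq_none_iff _ _).mp hx
      exact absurd ((h m).mpr hm) (by simp [hxs])
  | some m =>
    cases hy : PySem.List.max? ys (fun x => x) with
    | none =>
      have hys : ys = [] := (PySem.List.max?_eq_none_iff _ _).mp hy
      exact absurd ((h m).mp (PySem.List.max?_mem hx)) (by simp [hys])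
    | some n =>
      have h1 : m ≤ n := PySem.List.max?_isMax hy m ((h m).mp (PySem.List.max?_mem hx))
      have h2 : n ≤ m := PySem.List.max?_isMax hx n ((h n).mpr (PySem.List.max?_mem hy))
      exact congrArg some (le_antisymm h1 h2)

-- membership in one of A's count-thresholded rank sets
lemma mem_rankset (ranks : List Int) (t x : Int) :
    x ∈ PySem.Set.ofList (((PySem.Dict.counter ranks).items.filter (fun p => t ≤ p.2)).map Prod.fst)
      ↔ x ∈ ranks ∧ t ≤ (ranks.count x : Int) := by
  simp only [PySem.Set.mem_ofList, PySem.Dict.items_counter, List.mem_map, List.mem_filter,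
    decide_eq_true_eq]
  constructor
  · rintro ⟨p, ⟨⟨k, hk, rfl⟩, ht⟩, rfl⟩
    exact ⟨hk, ht⟩
  · rintro ⟨hx, ht⟩
    exact ⟨(x, (ranks.count x : Int)), ⟨⟨x, hx, rfl⟩, ht⟩, rfl⟩


-- membership in B's candidate list (same statement without the outer set())
lemma mem_candidates (ranks : List Int) (t x : Int) :
    x ∈ (((PySem.Dict.counter ranks).items.filter (fun p => t ≤ p.2)).map Prod.fst)
      ↔ x ∈ ranks ∧ t ≤ (ranks.count x : Int) := by
  simp only [PySem.Set.mem_ofList, PySem.Dict.items_counter, List.mem_map, List.mem_filter,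
    decide_eq_true_eq]
  constructor
  · rintro ⟨p, ⟨⟨k, hk, rfl⟩, ht⟩, rfl⟩
    exact ⟨hk, ht⟩
  · rintro ⟨hx, ht⟩
    exact ⟨(x, (ranks.count x : Int)), ⟨⟨x, hx, rfl⟩, ht⟩, rfl⟩

-- the common tail: A's "if len == 0 … else max" equals the match on max?
lemma result_shape (L : List Int) :
    (if L.length = 0 then ((false, []) : Bool × (List (String × Int)))
     else
       match PySem.List.max? L (fun x => x) with
       | some r => (true, [("rank", r)])
       | none => (false, [])) =
    (match PySem.List.max? L (fun x => x) with
     | some r => (true, [("rank", r)])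
     | none => (false, [])) := by
  cases hx : PySem.List.max? L (fun x => x) with
  | none =>
    have : L = [] := (PySem.List.max?_eq_none_iff _ _).mp hx
    simp [this]
  | some m =>
    have : L ≠ [] := by
      intro h; rw [h] at hx
      simp [(PySem.List.max?_eq_none_iff ([] : List Int) (fun x => x)).mpr rfl] at hx
    simp [List.length_eq_zero_iff, this]

-- ===== VERDICT (by name: the statement is the Claim_ definition above) =====
theorem four_of_a_kind_finder_spec : Claim_equal_four_of_a_kind_finder := by
  intro nc nw _
  unfold Spec_four_of_a_kind_finder four_of_a_kind_finder four_of_a_kind_finder_alt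
  simp only []
  set ranks := nc.map get_card_rank with hranks
  by_cases h4 : 4 ≤ nw
  · have h0 : nw ≠ 0 := by omega
    have h1 : nw ≠ 1 := by omega
    have h2 : nw ≠ 2 := by omega
    have h3 : nw ≠ 3 := by omega
    simp [h0, h1, h2, h3, h4, PySem.List.max?]
  · rw [result_shape]
    simp only [if_neg h4]
    have key : ∀ L : List Int,
        (∀ x, x ∈ L ↔ x ∈ ranks ∧ (4 - max nw 0) ≤ (ranks.count x : Int)) →
        (match PySem.List.max? L (fun x => x) with
         | some r => ((true, [("rank", r)]) : Bool × (List (String × Int)))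
         | none => (false, [])) =
        (match PySem.List.max? (((PySem.Dict.counter ranks).items.filter
              (fun p => (4 - max nw 0) ≤ p.2)).map Prod.fst) (fun x => x) with
         | some r => (true, [("rank", r)])
         | none => (false, [])) := by
      intro L hL
      have hmc := max?_id_congr L (((PySem.Dict.counter ranks).items.filter
          (fun p => (4 - max nw 0) ≤ p.2)).map Prod.fst)
        (fun x => (hL x).trans (mem_candidates ranks (4 - max nw 0) x).symm)
      rw [hmc]
    by_cases e0 : nw = 0
    · rw [if_pos e0]
      refine key _ (fun x => ?_)
      rw [mem_rankset]
      constructor <;> (rintro ⟨h, hc⟩; exact ⟨h, by omega⟩)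
    by_cases e1 : nw = 1
    · rw [if_neg e0, if_pos e1]
      refine key _ (fun x => ?_)
      simp only [PySem.Set.mem_union, mem_rankset]
      constructor
      · rintro (⟨h, hc⟩ | ⟨h, hc⟩) <;> exact ⟨h, by omega⟩
      · rintro ⟨h, hc⟩; exact Or.inr ⟨h, by omega⟩
    by_cases e2 : nw = 2
    · rw [if_neg e0, if_neg e1, if_pos e2]
      refine key _ (fun x => ?_)
      simp only [PySem.Set.mem_union, mem_rankset]
      constructor
      · rintro ((⟨h, hc⟩ | ⟨h, hc⟩) | ⟨h, hc⟩) <;> exact ⟨h, by omega⟩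
      · rintro ⟨h, hc⟩; exact Or.inr ⟨h, by omega⟩
    by_cases e3 : nw = 3
    · rw [if_neg e0, if_neg e1, if_neg e2, if_pos e3]
      refine key _ (fun x => ?_)
      simp only [PySem.Set.mem_union, mem_rankset]
      constructor
      · rintro (((⟨h, hc⟩ | ⟨h, hc⟩) | ⟨h, hc⟩) | ⟨h, hc⟩) <;>
          exact ⟨h, by have := List.count_pos_iff.mpr h; omega⟩
      · rintro ⟨h, hc⟩
        exact Or.inr ⟨h, by have := List.count_pos_iff.mpr h; omega⟩
    · -- num_wilds < 0: no elif branch fires, quartet_ranks is left as the count ≥ 4 set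
      rw [if_neg e0, if_neg e1, if_neg e2, if_neg e3]
      refine key _ (fun x => ?_)
      rw [mem_rankset]
      constructor <;> (rintro ⟨h, hc⟩; exact ⟨h, by omega⟩)
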